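-- pv_equiv track=rewrite | github.com/sycomix/ChatbotWithPersonality | CorpusProcessor.py | get_question_answer_set
-- ===== SOURCE A (Python) =====
-- def get_question_answer_set(line2content, coded_conversations):
--     questions = []
--     answers = []
--
--     for conversation in coded_conversations:
--        if len(conversation) < 2:
--            continue
--
--        for index in range(0, len(conversation), 2):
--            if index + 1 < len(conversation):
--                question_code = conversation[index]
--                answer_code = conversation[index + 1]
--
--                questions.append(line2content[question_code])
--                answers.append(line2content[answer_code])
--
--     return questions, answers
-- ===== SOURCE B (Python) =====
-- def get_question_answer_set(line2content, coded_conversations):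
--     # Element-wise state machine: walk each conversation one code at a time,
--     # buffering an unanswered question in `pending`; when the next code
--     # arrives the pair is complete and both texts are emitted.  A trailing
--     # code left in `pending` at the end of a conversation is discarded.
--     questions = []
--     answers = []
--     for conversation in coded_conversations:
--         pending = None
--         for code in conversation:
--             if pending is None:
--                 pending = code
--             else:
--                 questions.append(line2content[pending])
--                 answers.append(line2content[code])
--                 pending = None
--     return questions, answers
-- ===== Notes on version B (the rewrite author's own statement) =====
-- stated objective: simpler
-- what changed: Replaced A's index-stride loop (range(0,len,2), an index+1<len bounds check, a len<2 guard, two indexed reads) by a single element-wise pass per conversation with a pending-question state variable; a completed pair emits both texts, a trailing unpaired code is discarded because it stays in the buffer.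
import Mathlib
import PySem

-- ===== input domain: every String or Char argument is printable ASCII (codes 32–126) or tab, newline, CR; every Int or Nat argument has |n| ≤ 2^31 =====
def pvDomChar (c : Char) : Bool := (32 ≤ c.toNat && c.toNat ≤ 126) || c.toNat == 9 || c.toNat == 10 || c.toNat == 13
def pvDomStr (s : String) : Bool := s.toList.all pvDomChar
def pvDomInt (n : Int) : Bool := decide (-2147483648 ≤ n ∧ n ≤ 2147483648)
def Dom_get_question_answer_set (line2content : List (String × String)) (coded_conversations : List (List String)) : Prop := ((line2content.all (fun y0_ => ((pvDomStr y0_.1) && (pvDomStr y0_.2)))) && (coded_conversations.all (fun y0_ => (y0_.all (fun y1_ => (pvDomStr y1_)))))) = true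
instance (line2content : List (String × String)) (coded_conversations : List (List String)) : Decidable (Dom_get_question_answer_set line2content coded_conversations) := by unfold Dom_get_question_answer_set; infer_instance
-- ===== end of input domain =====

-- B replaces A's index-stride loop (range(0,len,2), an index+1<len bounds check, a
-- len<2 guard) by an element-wise pass with a pending-question buffer (simpler, same cost).
-- Equivalence is about the return value; neither version mutates its arguments.

-- ===== PORT A =====
-- line2content[code]: first-match association-list lookup; a missing key is a
-- KeyError in Python, excluded by Pre_; the total port defaults to "" there.
def pvLook (line2content : List (String × String)) (code : String) : String :=
  (PySem.Dict.get? (PySem.Dict.mk line2content) code).getD ""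

def get_question_answer_set (line2content : List (String × String)) (coded_conversations : List (List String)) : List String × List String :=
  coded_conversations.foldl
    (fun (st : List String × List String) (conversation : List String) =>
      if conversation.length < 2 then st
      else
        (PySem.List.pyRange 0 (conversation.length : Int) 2).foldl
          (fun (st : List String × List String) (index : Int) =>
            if index + 1 < (conversation.length : Int) then
              (st.1 ++ [pvLook line2content (PySem.List.pyGetD conversation index "")],
               st.2 ++ [pvLook line2content (PySem.List.pyGetD conversation (index + 1) "")])
            else st) st)
    ([], [])

-- ===== PORT B =====
-- `pending = None` / `pending = code` is the Option String component of the fold state;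
-- a completed pair appends both looked-up texts and clears the buffer.
def get_question_answer_set_alt (line2content : List (String × String)) (coded_conversations : List (List String)) : List String × List String :=
  coded_conversations.foldl
    (fun (st : List String × List String) (conversation : List String) =>
      let r := conversation.foldl
        (fun (s : List String × List String × Option String) (code : String) =>
          match s.2.2 with
          | none => (s.1, s.2.1, some code)
          | some pending =>
              (s.1 ++ [pvLook line2content pending],
               s.2.1 ++ [pvLook line2content code], none))
        (st.1, st.2, none)
      (r.1, r.2.1))
    ([], [])

-- ===== PRECONDITION & SPEC =====
-- Pre_ excludes exactly the inputs on which Python A raises KeyError: a code at a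
-- paired position (the first 2*(len//2) entries of a conversation) missing from line2content.
def Pre_get_question_answer_set (line2content : List (String × String)) (coded_conversations : List (List String)) : Prop :=
  ∀ conversation ∈ coded_conversations,
    ∀ code ∈ conversation.take (2 * (conversation.length / 2)),
      (PySem.Dict.get? (PySem.Dict.mk line2content) code).isSome = true
instance (line2content : List (String × String)) (coded_conversations : List (List String)) : Decidable (Pre_get_question_answer_set line2content coded_conversations) := by unfold Pre_get_question_answer_set; infer_instance

def pvWitness_get_question_answer_set : (List (String × String)) × List (List String) :=
  ([("q1", "Hi there"), ("a1", "Hello"), ("q2", "How are you?"), ("a2", "Fine")],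
   [["q1", "a1", "q2", "a2", "zz"], ["q2", "a2"], ["q1"], []])

def Spec_get_question_answer_set (line2content : List (String × String)) (coded_conversations : List (List String)) (out : List String × List String) : Prop := out = get_question_answer_set_alt line2content coded_conversations
instance (line2content : List (String × String)) (coded_conversations : List (List String)) (out : List String × List String) : Decidable (Spec_get_question_answer_set line2content coded_conversations out) := by unfold Spec_get_question_answer_set; infer_instance

-- ===== CLAIM =====
def Claim_equal_get_question_answer_set : Prop := ∀ (line2content : List (String × String)) (coded_conversations : List (List String)), Dom_get_question_answer_set line2content coded_conversations → Pre_get_question_answer_set line2content coded_conversations → Spec_get_question_answer_set line2content coded_conversations (get_question_answer_set line2content coded_conversations)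

-- ===== LEMMAS AND PROOFS =====

-- Proof-side characterisation: the consecutive (question, answer) code pairs of a
-- conversation, dropping a trailing unpaired code.  Both ports are reduced to it.
def pvIterPairs : List String → List (String × String)
  | q :: a :: rest => (q, a) :: pvIterPairs rest
  | _ => []

-- The Nat-indexed form of A's inner loop equals the pvIterPairs projections.
theorem pvInnerNat (lc : List (String × String)) :
    ∀ (conv : List String) (qs as : List String),
    (List.range ((conv.length + 1) / 2)).foldl
      (fun (st : List String × List String) (k : Nat) =>
        if 0 + 2 * (k : Int) + 1 < (conv.length : Int) then
          (st.1 ++ [pvLook lc (PySem.List.pyGetD conv (0 + 2 * (k : Int)) "")],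
           st.2 ++ [pvLook lc (PySem.List.pyGetD conv (0 + 2 * (k : Int) + 1) "")])
        else st) (qs, as)
    = (qs ++ (pvIterPairs conv).map (fun p => pvLook lc p.1),
       as ++ (pvIterPairs conv).map (fun p => pvLook lc p.2))
  | [], qs, as => by simp [pvIterPairs]
  | [x], qs, as => by
      simp [pvIterPairs, List.range_succ]
  | q :: a :: rest, qs, as => by
      have hlen : ((q :: a :: rest).length + 1) / 2 = (rest.length + 1) / 2 + 1 := by
        simp; omega
      rw [hlen, List.range_succ_eq_map, List.foldl_cons, List.foldl_map]
      have hc0 : (0 + 2 * ((0 : Nat) : Int) + 1 < ((q :: a :: rest).length : Int)) := by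
        simp only [List.length_cons]; push_cast; omega
      rw [if_pos hc0]
      have hq : PySem.List.pyGetD (q :: a :: rest) (0 + 2 * ((0 : Nat) : Int)) "" = q := by
        norm_num [PySem.List.pyGetD_ofNat']
      have ha : PySem.List.pyGetD (q :: a :: rest) (0 + 2 * ((0 : Nat) : Int) + 1) "" = a := by
        norm_num [PySem.List.pyGetD_ofNat']
      have hbody :
          (fun (st : List String × List String) (k : Nat) =>
            if 0 + 2 * ((Nat.succ k : Nat) : Int) + 1 < ((q :: a :: rest).length : Int) then
              (st.1 ++ [pvLook lc (PySem.List.pyGetD (q :: a :: rest) (0 + 2 * ((Nat.succ k : Nat) : Int)) "")],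
               st.2 ++ [pvLook lc (PySem.List.pyGetD (q :: a :: rest) (0 + 2 * ((Nat.succ k : Nat) : Int) + 1) "")])
            else st)
          = (fun (st : List String × List String) (k : Nat) =>
            if 0 + 2 * (k : Int) + 1 < (rest.length : Int) then
              (st.1 ++ [pvLook lc (PySem.List.pyGetD rest (0 + 2 * (k : Int)) "")],
               st.2 ++ [pvLook lc (PySem.List.pyGetD rest (0 + 2 * (k : Int) + 1) "")])
            else st) := by
        funext st k
        have hcond : (0 + 2 * ((Nat.succ k : Nat) : Int) + 1 < ((q :: a :: rest).length : Int))
            ↔ (0 + 2 * (k : Int) + 1 < (rest.length : Int)) := by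
          simp only [List.length_cons]; push_cast; omega
        have e1 : (0 + 2 * ((Nat.succ k : Nat) : Int)) = ((2 * k + 2 : Nat) : Int) := by
          push_cast; ring
        have e2 : (0 + 2 * ((Nat.succ k : Nat) : Int) + 1) = ((2 * k + 3 : Nat) : Int) := by
          push_cast; ring
        have e3 : (0 + 2 * (k : Int)) = ((2 * k : Nat) : Int) := by push_cast; ring
        have e4 : (0 + 2 * (k : Int) + 1) = ((2 * k + 1 : Nat) : Int) := by push_cast; ring
        have g1 : PySem.List.pyGetD (q :: a :: rest) (0 + 2 * ((Nat.succ k : Nat) : Int)) ""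
            = PySem.List.pyGetD rest (0 + 2 * (k : Int)) "" := by
          rw [e1, e3, PySem.List.pyGetD_natCast, PySem.List.pyGetD_natCast]
          show List.getD (q :: a :: rest) (2 * k + 1 + 1) "" = _
          rw [List.getD_cons_succ]
          show List.getD (a :: rest) (2 * k + 1) "" = _
          rw [List.getD_cons_succ]
        have g2 : PySem.List.pyGetD (q :: a :: rest) (0 + 2 * ((Nat.succ k : Nat) : Int) + 1) ""
            = PySem.List.pyGetD rest (0 + 2 * (k : Int) + 1) "" := by
          rw [e2, e4, PySem.List.pyGetD_natCast, PySem.List.pyGetD_natCast]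
          show List.getD (q :: a :: rest) (2 * k + 2 + 1) "" = _
          rw [List.getD_cons_succ]
          show List.getD (a :: rest) (2 * k + 1 + 1) "" = _
          rw [List.getD_cons_succ]
        simp only [hcond, g1, g2]
      rw [hq, ha, hbody, pvInnerNat lc rest]
      simp [pvIterPairs]

-- A's inner index loop over one conversation appends exactly the pvIterPairs projections.
theorem pvInner_eq (lc : List (String × String)) (conv : List String) (qs as : List String) :
    (PySem.List.pyRange 0 (conv.length : Int) 2).foldl
      (fun (st : List String × List String) (index : Int) =>
        if index + 1 < (conv.length : Int) then
          (st.1 ++ [pvLook lc (PySem.List.pyGetD conv index "")],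
           st.2 ++ [pvLook lc (PySem.List.pyGetD conv (index + 1) "")])
        else st) (qs, as)
    = (qs ++ (pvIterPairs conv).map (fun p => pvLook lc p.1),
       as ++ (pvIterPairs conv).map (fun p => pvLook lc p.2)) := by
  rw [PySem.List.pyRange_of_pos 0 (conv.length : Int) (by norm_num), List.foldl_map]
  have hcnt : (if (0 : Int) < (conv.length : Int) then
      (((conv.length : Int) - 0 + 2 - 1) / 2).toNat else 0) = (conv.length + 1) / 2 := by
    split_ifs with h
    · omega
    · omega
  rw [hcnt]
  exact pvInnerNat lc conv qs as

-- A conversation shorter than 2 contributes no pairs.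
theorem pvIterPairs_short (conv : List String) (h : conv.length < 2) : pvIterPairs conv = [] := by
  match conv with
  | [] => rfl
  | [x] => rfl
  | a :: b :: t => simp at h

-- A's outer fold, with generalized accumulator, equals the flatMap of the projections.
theorem pvOuterA (lc : List (String × String)) :
    ∀ (ccs : List (List String)) (qs as : List String),
    ccs.foldl
      (fun (st : List String × List String) (conversation : List String) =>
        if conversation.length < 2 then st
        else
          (PySem.List.pyRange 0 (conversation.length : Int) 2).foldl
            (fun (st : List String × List String) (index : Int) =>
              if index + 1 < (conversation.length : Int) then
                (st.1 ++ [pvLook lc (PySem.List.pyGetD conversation index "")],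
                 st.2 ++ [pvLook lc (PySem.List.pyGetD conversation (index + 1) "")])
              else st) st) (qs, as)
    = (qs ++ ccs.flatMap (fun c => (pvIterPairs c).map (fun p => pvLook lc p.1)),
       as ++ ccs.flatMap (fun c => (pvIterPairs c).map (fun p => pvLook lc p.2)))
  | [], qs, as => by simp
  | c :: t, qs, as => by
      rw [List.foldl_cons]
      by_cases h : c.length < 2
      · rw [if_pos h, pvOuterA lc t qs as]
        simp [pvIterPairs_short c h]
      · rw [if_neg h, pvInner_eq lc c qs as, pvOuterA lc t]
        simp [List.append_assoc]

-- The trailing unpaired code, if any, that B's state machine leaves in its buffer.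
def pvLeft : List String → Option String
  | [] => none
  | [x] => some x
  | _ :: _ :: rest => pvLeft rest

-- B's inner state-machine fold over one conversation (buffer starting empty).
theorem pvAltInner (lc : List (String × String)) :
    ∀ (conv : List String) (qs as : List String),
    conv.foldl
      (fun (s : List String × List String × Option String) (code : String) =>
        match s.2.2 with
        | none => (s.1, s.2.1, some code)
        | some pending =>
            (s.1 ++ [pvLook lc pending], s.2.1 ++ [pvLook lc code], none))
      (qs, as, none)
    = (qs ++ (pvIterPairs conv).map (fun p => pvLook lc p.1),
       as ++ (pvIterPairs conv).map (fun p => pvLook lc p.2),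
       pvLeft conv)
  | [], qs, as => by simp [pvIterPairs, pvLeft]
  | [x], qs, as => by simp [pvIterPairs, pvLeft, List.foldl_cons]
  | q :: a :: rest, qs, as => by
      rw [List.foldl_cons, List.foldl_cons]
      show List.foldl _ (qs ++ [pvLook lc q], as ++ [pvLook lc a], none) rest = _
      rw [pvAltInner lc rest]
      simp [pvIterPairs, pvLeft, List.append_assoc]

-- B's outer fold, with generalized accumulator, equals the same flatMap of projections.
theorem pvOuterB (lc : List (String × String)) :
    ∀ (ccs : List (List String)) (qs as : List String),
    ccs.foldl
      (fun (st : List String × List String) (conversation : List String) =>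
        let r := conversation.foldl
          (fun (s : List String × List String × Option String) (code : String) =>
            match s.2.2 with
            | none => (s.1, s.2.1, some code)
            | some pending =>
                (s.1 ++ [pvLook lc pending], s.2.1 ++ [pvLook lc code], none))
          (st.1, st.2, none)
        (r.1, r.2.1)) (qs, as)
    = (qs ++ ccs.flatMap (fun c => (pvIterPairs c).map (fun p => pvLook lc p.1)),
       as ++ ccs.flatMap (fun c => (pvIterPairs c).map (fun p => pvLook lc p.2)))
  | [], qs, as => by simp
  | c :: t, qs, as => by
      rw [List.foldl_cons]
      show List.foldl _ ((List.foldl _ ((qs, as).1, (qs, as).2, none) c).1,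
        (List.foldl _ ((qs, as).1, (qs, as).2, none) c).2.1) t = _
      rw [pvAltInner lc c]
      rw [pvOuterB lc t]
      simp [List.append_assoc]

theorem get_question_answer_set_spec : Claim_equal_get_question_answer_set := by
  intro lc ccs _ _
  unfold Spec_get_question_answer_set get_question_answer_set get_question_answer_set_alt
  rw [pvOuterA lc ccs [] [], pvOuterB lc ccs [] []]
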